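-- pv_equiv track=rewrite | github.com/ASSERT-KTH/Mokav | experiments/pynguin/c4b/single-return/generated_tests/src_1948/9/src_1948.py | func
-- ===== SOURCE A (Python) =====
-- def func(*args):
--
-- 	ls = [0, 1, 2]
-- 	(n, x) = (int(args[0]), int(args[1]))
-- 	for j in range(1, ((n % 6) + 1)):
-- 	    if ((j % 2) != 0):
-- 	        (ls[0], ls[1]) = (ls[1], ls[0])
-- 	    else:
-- 	        (ls[1], ls[2]) = (ls[2], ls[1])
-- 	return(ls[x])
-- ===== SOURCE B (Python) =====
-- _T = [[0, 1, 2], [1, 0, 2], [1, 2, 0], [2, 1, 0], [2, 0, 1], [0, 2, 1]]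
--
-- def func(*args):
--     (n, x) = (int(args[0]), int(args[1]))
--     return _T[n % 6][x]
-- ===== Notes on version B (the rewrite author's own statement) =====
-- stated objective: simpler
-- what changed: Replaces the iterative swap simulation (n%6 loop steps mutating a 3-list) with a direct lookup in a precomputed table of the six period-6 permutation states.
import Mathlib
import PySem

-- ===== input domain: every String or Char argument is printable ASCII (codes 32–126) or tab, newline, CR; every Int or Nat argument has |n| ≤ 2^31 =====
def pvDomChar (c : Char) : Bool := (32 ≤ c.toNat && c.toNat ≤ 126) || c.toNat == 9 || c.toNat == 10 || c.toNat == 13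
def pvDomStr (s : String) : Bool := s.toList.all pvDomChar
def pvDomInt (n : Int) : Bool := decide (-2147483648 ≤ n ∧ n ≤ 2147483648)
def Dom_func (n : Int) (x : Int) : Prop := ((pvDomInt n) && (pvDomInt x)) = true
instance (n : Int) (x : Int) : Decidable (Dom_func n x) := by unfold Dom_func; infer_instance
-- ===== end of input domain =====

-- B replaces A's iterative swap simulation by a lookup in the precomputed table of the six period-6 states (simpler).

-- ===== PORT A =====
-- literal transliteration: ls = [0,1,2]; for j in range(1, n%6+1): swap ls[0],ls[1] or ls[1],ls[2]; return ls[x]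
def func (n : Int) (x : Int) : Int :=
  let ls : List Int := [0, 1, 2]
  let ls := (PySem.List.pyRange 1 (PySem.Int.mod n 6 + 1) 1).foldl
    (fun ls j =>
      if PySem.Int.mod j 2 ≠ 0 then
        -- (ls[0], ls[1]) = (ls[1], ls[0])
        PySem.List.pySetD (PySem.List.pySetD ls 0 (PySem.List.pyGetD ls 1 0)) 1 (PySem.List.pyGetD ls 0 0)
      else
        -- (ls[1], ls[2]) = (ls[2], ls[1])
        PySem.List.pySetD (PySem.List.pySetD ls 1 (PySem.List.pyGetD ls 2 0)) 2 (PySem.List.pyGetD ls 1 0))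
    ls
  PySem.List.pyGetD ls x 0   -- ls[x]; Pre_func makes the index in range

-- ===== PORT B =====
def pvTable : List (List Int) :=
  [[0, 1, 2], [1, 0, 2], [1, 2, 0], [2, 1, 0], [2, 0, 1], [0, 2, 1]]

def func_alt (n : Int) (x : Int) : Int :=
  PySem.List.pyGetD (PySem.List.pyGetD pvTable (PySem.Int.mod n 6) []) x 0

-- ===== PRECONDITION & SPEC =====
-- Pre_ excludes exactly the indices x where Python's ls[x] raises IndexError (list has length 3).
def Pre_func (n : Int) (x : Int) : Prop := PySem.Raise.InRange 3 x
instance (n : Int) (x : Int) : Decidable (Pre_func n x) := by unfold Pre_func; infer_instance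
def pvWitness_func : Int × Int := (7, -1)
def Spec_func (n : Int) (x : Int) (out : Int) : Prop := out = func_alt n x
instance (n : Int) (x : Int) (out : Int) : Decidable (Spec_func n x out) := by unfold Spec_func; infer_instance

-- ===== CLAIM (what is proved, stated in full; the proofs are below) =====
def Claim_equal_func : Prop := ∀ (n : Int) (x : Int), Dom_func n x → Pre_func n x → Spec_func n x (func n x)

-- ===== LEMMAS AND PROOFS =====

-- the simulated list after r swaps is exactly row r of the table, for each residue r = n % 6
lemma func_rows (r : Int) (h0 : 0 ≤ r) (h6 : r < 6) :
    (PySem.List.pyRange 1 (r + 1) 1).foldl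
      (fun ls j =>
        if PySem.Int.mod j 2 ≠ 0 then
          PySem.List.pySetD (PySem.List.pySetD ls 0 (PySem.List.pyGetD ls 1 0)) 1 (PySem.List.pyGetD ls 0 0)
        else
          PySem.List.pySetD (PySem.List.pySetD ls 1 (PySem.List.pyGetD ls 2 0)) 2 (PySem.List.pyGetD ls 1 0))
      ([0, 1, 2] : List Int)
    = PySem.List.pyGetD pvTable r [] := by
  have : r = 0 ∨ r = 1 ∨ r = 2 ∨ r = 3 ∨ r = 4 ∨ r = 5 := by omega
  rcases this with h | h | h | h | h | h <;> subst h <;> decide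

-- ===== VERDICT (by name: the statement is the Claim_ definition above) =====
theorem func_spec : Claim_equal_func := by
  intro n x _ _
  unfold Spec_func func func_alt
  have h0 : 0 ≤ PySem.Int.mod n 6 := PySem.Int.mod_nonneg n (by norm_num)
  have h6 : PySem.Int.mod n 6 < 6 := PySem.Int.mod_lt n (by norm_num)
  simp only [func_rows _ h0 h6]
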